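-- pv_equiv track=rewrite | github.com/Genkinger/NerveStitcher-Toolkit | simple_thresholding.py | per_image_artefact_mask_to_image_pair_mask
-- ===== SOURCE A (Python) =====
-- def per_image_artefact_mask_to_image_pair_mask(artefact_mask):
--     # es werden nur 1,2 2,3 3,4 etc beruecksichtigt:
--     # bei n bildern gibt es n-1 matches
--     # ist bild i von artefakt betroffen so ist jeder match der i beinhaltet betroffen i-1,i und i,i+1
--     match_mask = [0 for _ in range(len(artefact_mask) - 1)]
--     for i, mask in enumerate(artefact_mask):
--         if mask == 1:
--             if i > 0:
--                 match_mask[i - 1] = 1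
--             if i < len(match_mask):
--                 match_mask[i] = 1
--     return match_mask
-- ===== SOURCE B (Python) =====
-- def per_image_artefact_mask_to_image_pair_mask(artefact_mask):
--     # gather: match j is affected iff image j or image j+1 is flagged
--     return [1 if artefact_mask[j] == 1 or artefact_mask[j + 1] == 1 else 0
--             for j in range(len(artefact_mask) - 1)]
-- ===== Notes on version B (the rewrite author's own statement) =====
-- stated objective: simpler
-- what changed: Replaced the scatter loop over images writing 1s into neighbouring slots of a pre-built zero list by a direct gather comprehension over match indices reading the two adjacent image flags.
import Mathlib
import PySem

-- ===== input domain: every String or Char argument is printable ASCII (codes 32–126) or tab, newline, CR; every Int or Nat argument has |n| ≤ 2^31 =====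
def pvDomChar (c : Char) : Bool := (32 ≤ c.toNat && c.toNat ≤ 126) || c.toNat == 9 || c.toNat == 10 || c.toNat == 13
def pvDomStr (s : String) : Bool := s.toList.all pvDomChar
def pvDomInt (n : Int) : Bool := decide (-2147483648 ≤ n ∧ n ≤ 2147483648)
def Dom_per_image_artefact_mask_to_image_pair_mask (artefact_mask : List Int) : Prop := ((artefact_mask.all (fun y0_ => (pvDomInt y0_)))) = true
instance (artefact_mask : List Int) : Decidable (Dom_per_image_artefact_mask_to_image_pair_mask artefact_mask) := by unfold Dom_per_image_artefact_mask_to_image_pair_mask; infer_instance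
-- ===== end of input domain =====

-- B replaces A's scatter loop (writing into neighbouring slots of a zero list) by a
-- direct gather over match indices; objective: simpler, same O(n) cost.


-- ===== PORT A =====
-- one loop-body step: the body of 'for i, mask in enumerate(artefact_mask)'
def pvStepA (mm : List Int) (p : Int × Int) : List Int :=
  if p.2 = 1 then
    let mm1 := if p.1 > 0 then mm.set (p.1 - 1).toNat 1 else mm
    if p.1 < (mm1.length : Int) then mm1.set p.1.toNat 1 else mm1
  else mm

def per_image_artefact_mask_to_image_pair_mask (artefact_mask : List Int) : List Int :=
  let match_mask := (List.range (artefact_mask.length - 1)).map (fun _ => (0 : Int))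
  (PySem.List.enumerate artefact_mask).foldl pvStepA match_mask

-- ===== PORT B =====
def per_image_artefact_mask_to_image_pair_mask_alt (artefact_mask : List Int) : List Int :=
  (List.range (artefact_mask.length - 1)).map (fun j =>
    if artefact_mask.getD j 0 = 1 ∨ artefact_mask.getD (j + 1) 0 = 1 then (1 : Int) else 0)

-- ===== PRECONDITION & SPEC =====
def Spec_per_image_artefact_mask_to_image_pair_mask (artefact_mask : List Int) (out : List Int) : Prop := out = per_image_artefact_mask_to_image_pair_mask_alt artefact_mask
instance (artefact_mask : List Int) (out : List Int) : Decidable (Spec_per_image_artefact_mask_to_image_pair_mask artefact_mask out) := by unfold Spec_per_image_artefact_mask_to_image_pair_mask; infer_instance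

-- ===== CLAIM (what is proved, stated in full; the proofs are below) =====
def Claim_equal_per_image_artefact_mask_to_image_pair_mask : Prop := ∀ (artefact_mask : List Int), Dom_per_image_artefact_mask_to_image_pair_mask artefact_mask → Spec_per_image_artefact_mask_to_image_pair_mask artefact_mask (per_image_artefact_mask_to_image_pair_mask artefact_mask)

-- ===== LEMMAS AND PROOFS =====

-- the state of A's loop after processing images 0..k-1, entry j
def pvG (am : List Int) (k : Nat) (j : Nat) : Int :=
  if (am.getD j 0 = 1 ∧ j < k) ∨ (am.getD (j + 1) 0 = 1 ∧ j + 1 < k) then 1 else 0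

-- pvG is unchanged by step k at entries step k does not touch
lemma pvG_succ_eq (am : List Int) (k j : Nat) (hjk : j ≠ k) (hjk1 : j + 1 ≠ k) :
    pvG am k j = pvG am (k + 1) j := by
  unfold pvG
  refine if_congr ?_ rfl rfl
  constructor
  · rintro (⟨h1, h2⟩ | ⟨h1, h2⟩)
    exacts [Or.inl ⟨h1, by omega⟩, Or.inr ⟨h1, by omega⟩]
  · rintro (⟨h1, h2⟩ | ⟨h1, h2⟩)
    exacts [Or.inl ⟨h1, by omega⟩, Or.inr ⟨h1, by omega⟩]

-- when image k is not flagged, step k changes nothing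
lemma pvG_succ_eq_of_ne (am : List Int) (k j : Nat) (hne : am.getD k 0 ≠ 1) :
    pvG am k j = pvG am (k + 1) j := by
  by_cases hjk : j = k
  · subst hjk
    unfold pvG
    refine if_congr ?_ rfl rfl
    constructor
    · rintro (⟨h1, h2⟩ | ⟨h1, h2⟩)
      exacts [Or.inl ⟨h1, by omega⟩, Or.inr ⟨h1, by omega⟩]
    · rintro (⟨h1, h2⟩ | ⟨h1, h2⟩)
      exacts [absurd h1 hne, absurd h2 (by omega)]
  · by_cases hjk1 : j + 1 = k
    · unfold pvG
      refine if_congr ?_ rfl rfl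
      constructor
      · rintro (⟨h1, h2⟩ | ⟨h1, h2⟩)
        exacts [Or.inl ⟨h1, by omega⟩, Or.inr ⟨h1, by omega⟩]
      · rintro (⟨h1, h2⟩ | ⟨h1, h2⟩)
        exacts [Or.inl ⟨h1, by omega⟩, absurd (hjk1 ▸ h1) hne]
    · exact pvG_succ_eq am k j hjk hjk1

lemma pvG_at_k (am : List Int) (k : Nat) (hx : am.getD k 0 = 1) : pvG am (k + 1) k = 1 := by
  unfold pvG
  rw [if_pos (Or.inl ⟨hx, Nat.lt_succ_self k⟩)]

-- the value of an entry of A's state after step k, when image k is flagged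
lemma pvG_succ_val (am : List Int) (k j : Nat) (hx : am.getD k 0 = 1) :
    pvG am (k + 1) j = if k = j ∨ (k - 1 = j ∧ 0 < k) then 1 else pvG am k j := by
  by_cases c1 : k = j
  · subst c1
    rw [pvG_at_k am k hx, if_pos (Or.inl rfl)]
  · by_cases c2 : k - 1 = j ∧ 0 < k
    · have hj1 : j + 1 = k := by omega
      have hval : pvG am (k + 1) j = 1 := by
        unfold pvG
        rw [hj1, if_pos (Or.inr ⟨hx, Nat.lt_succ_self k⟩)]
      rw [hval, if_pos (Or.inr c2)]
    · rw [if_neg (by tauto)]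
      exact (pvG_succ_eq am k j (fun h => c1 h.symm) (by omega)).symm

lemma pvStepA_state (am : List Int) (k : Nat) (x : Int) (_hk : k < am.length)
    (hx : am.getD k 0 = x) :
    pvStepA ((List.range (am.length - 1)).map (pvG am k)) ((k : Int), x)
      = (List.range (am.length - 1)).map (pvG am (k + 1)) := by
  by_cases hx1 : x = 1
  · subst hx1
    have hkt : ((k : Int)).toNat = k := by omega
    have hkt1 : ((k : Int) - 1).toNat = k - 1 := by omega
    apply List.ext_getElem
    · simp only [pvStepA]; split_ifs <;> simp
    · intro j hj1 hj2
      simp only [List.length_map, List.length_range] at hj2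
      simp only [pvStepA, hkt, hkt1]
      simp only [apply_ite List.length, List.length_set, List.length_map, List.length_range,
        ite_self]
      simp only [List.getElem_map, List.getElem_range]
      rw [pvG_succ_val am k j hx]
      split_ifs with hone hk0 hkn hkn' <;>
        simp only [List.getElem_set, List.getElem_map, List.getElem_range] <;>
        split_ifs <;> first | rfl | omega
  · have hstep : pvStepA ((List.range (am.length - 1)).map (pvG am k)) ((k : Int), x)
        = (List.range (am.length - 1)).map (pvG am k) := by
      simp only [pvStepA, if_neg hx1]
    rw [hstep]
    exact List.map_congr_left (fun j _ => pvG_succ_eq_of_ne am k j (hx ▸ hx1))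

lemma pvLoopA (am : List Int) : ∀ (suf : List Int) (k : Nat), suf = am.drop k →
    (PySem.List.enumerate suf (k : Int)).foldl pvStepA ((List.range (am.length - 1)).map (pvG am k))
      = (List.range (am.length - 1)).map (pvG am (k + suf.length)) := by
  intro suf
  induction suf with
  | nil => intro k _; simp
  | cons x rest ih =>
    intro k hsuf
    have hk : k < am.length := by
      have := congrArg List.length hsuf
      simp [List.length_drop] at this
      omega
    have hdrop : am.drop k = am[k] :: am.drop (k + 1) := List.drop_eq_getElem_cons hk
    rw [← hsuf] at hdrop
    have hx : x = am[k] := by have := congrArg (fun l => l.headD 0) hdrop; simpa [List.getElem?_eq_getElem hk] using this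
    have hrest : rest = am.drop (k + 1) := by simpa using congrArg List.tail hdrop
    rw [PySem.List.enumerate_cons, List.foldl_cons,
        pvStepA_state am k x hk (by simp [hx, List.getD_eq_getElem?_getD, hk]),
        show ((k : Int) + 1) = ((k + 1 : Nat) : Int) by push_cast; ring,
        ih (k + 1) hrest]
    congr 2
    simp [List.length_cons]
    omega

-- ===== VERDICT (by name: the statement is the Claim_ definition above) =====
theorem per_image_artefact_mask_to_image_pair_mask_spec : Claim_equal_per_image_artefact_mask_to_image_pair_mask := by
  intro am _
  unfold Spec_per_image_artefact_mask_to_image_pair_mask per_image_artefact_mask_to_image_pair_mask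
  have h0 : (List.range (am.length - 1)).map (fun _ => (0 : Int))
      = (List.range (am.length - 1)).map (pvG am 0) := by
    refine List.map_congr_left (fun j hj => ?_)
    simp [pvG]
  rw [h0]
  have := pvLoopA am am 0 (by simp)
  simp only [Nat.zero_add] at this
  rw [show ((0:Nat) : Int) = (0:Int) by simp] at this
  rw [this]
  unfold per_image_artefact_mask_to_image_pair_mask_alt
  refine List.map_congr_left (fun j hj => ?_)
  rw [List.mem_range] at hj
  simp only [pvG]
  congr 1
  have h1 : j < am.length := by omega
  have h2 : j + 1 < am.length := by omega
  simp [h1, h2]
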